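-- pv_equiv track=rewrite | github.com/luyihsien/programmer-diary | pretest2hr/part1_Multiples of 3 and 5..py | multiples
-- ===== SOURCE A (Python) =====
-- def multiples(num1, num2, maxNum):
--     nums = []
--     for i in range(2, maxNum):
--         if i % num1 == 0:
--             nums.append(i)
--         elif i % num2 == 0:
--             nums.append(i)
--         else:
--             pass
--     return nums
-- ===== SOURCE B (Python) =====
-- def multiples(num1, num2, maxNum):
--     # Merge the multiples of |num1| and |num2| directly instead of scanning every i.
--     d1, d2 = abs(num1), abs(num2)
--     a = -(-2 // d1) * d1  # smallest multiple of d1 that is >= 2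
--     b = -(-2 // d2) * d2  # smallest multiple of d2 that is >= 2
--     out = []
--     while a < maxNum or b < maxNum:
--         if b >= maxNum or (a < maxNum and a < b):
--             out.append(a)
--             a += d1
--         elif a >= maxNum or b < a:
--             out.append(b)
--             b += d2
--         else:  # a == b, both in range
--             out.append(a)
--             a += d1
--             b += d2
--     return out
-- ===== Notes on version B (the rewrite author's own statement) =====
-- stated objective: faster
-- what changed: A scans every integer in [2, maxNum) and tests divisibility; B generates the multiples of |num1| and |num2| directly from their first multiple >= 2 and merges the two sorted streams, deduping equal heads.
-- outside the precondition, e.g. on multiples(1, 0, 10): A returns [2, 3, 4, 5, 6, 7, 8, 9], B raises ZeroDivisionError; on multiples(0, 3, 1): A returns [], B raises ZeroDivisionError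
import Mathlib
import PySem

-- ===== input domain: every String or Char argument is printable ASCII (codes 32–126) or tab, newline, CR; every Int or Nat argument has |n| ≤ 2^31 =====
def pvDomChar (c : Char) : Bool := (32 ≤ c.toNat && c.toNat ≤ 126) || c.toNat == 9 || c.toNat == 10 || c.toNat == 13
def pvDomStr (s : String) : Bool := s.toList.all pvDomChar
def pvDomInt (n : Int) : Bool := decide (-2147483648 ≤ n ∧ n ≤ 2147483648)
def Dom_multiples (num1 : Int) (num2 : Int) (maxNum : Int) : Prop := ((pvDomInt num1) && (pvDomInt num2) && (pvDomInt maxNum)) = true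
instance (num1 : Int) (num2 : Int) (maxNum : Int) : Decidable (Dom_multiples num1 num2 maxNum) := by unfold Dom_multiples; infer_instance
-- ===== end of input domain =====

-- B replaces A's scan of every integer in [2, maxNum) by a sorted merge of the
-- multiples of |num1| and |num2| (faster: O(maxNum/num1 + maxNum/num2) vs O(maxNum)).

-- ===== PORT A =====
def multiples (num1 : Int) (num2 : Int) (maxNum : Int) : List Int :=
  (PySem.List.pyRange 2 maxNum 1).foldl
    (fun nums i =>
      if PySem.Int.mod i num1 = 0 then nums ++ [i]
      else if PySem.Int.mod i num2 = 0 then nums ++ [i]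
      else nums) []

-- ===== PORT B =====
-- the single while-loop of Source B; the fuel argument (the loop runs at most
-- (maxNum-a) + (maxNum-b) times) only makes the recursion structural/total
def mergeLoop (d1 d2 maxNum : Int) : Nat → Int → Int → List Int → List Int
  | 0, _, _, out => out
  | fuel + 1, a, b, out =>
    if a < maxNum ∨ b < maxNum then
      if maxNum ≤ b ∨ (a < maxNum ∧ a < b) then
        mergeLoop d1 d2 maxNum fuel (a + d1) b (out ++ [a])
      else if maxNum ≤ a ∨ b < a then
        mergeLoop d1 d2 maxNum fuel a (b + d2) (out ++ [b])
      else
        mergeLoop d1 d2 maxNum fuel (a + d1) (b + d2) (out ++ [a])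
    else out

def multiples_alt (num1 : Int) (num2 : Int) (maxNum : Int) : List Int :=
  let d1 := |num1|
  let d2 := |num2|
  let a := -(PySem.Int.floordiv (-2) d1) * d1
  let b := -(PySem.Int.floordiv (-2) d2) * d2
  mergeLoop d1 d2 maxNum ((maxNum - a).toNat + (maxNum - b).toNat) a b []

-- ===== PRECONDITION & SPEC =====
-- Pre_ excludes num1 = 0 or num2 = 0: there A raises ZeroDivisionError on the first
-- iteration it evaluates the zero modulus (it returns only when the range is empty or
-- the elif is short-circuited), and B raises ZeroDivisionError whenever a divisor is 0.
def Pre_multiples (num1 : Int) (num2 : Int) (maxNum : Int) : Prop := num1 ≠ 0 ∧ num2 ≠ 0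
instance (num1 : Int) (num2 : Int) (maxNum : Int) : Decidable (Pre_multiples num1 num2 maxNum) := by unfold Pre_multiples; infer_instance
def pvWitness_multiples : Int × Int × Int := (3, 5, 20)

def Spec_multiples (num1 : Int) (num2 : Int) (maxNum : Int) (out : List Int) : Prop := out = multiples_alt num1 num2 maxNum
instance (num1 : Int) (num2 : Int) (maxNum : Int) (out : List Int) : Decidable (Spec_multiples num1 num2 maxNum out) := by unfold Spec_multiples; infer_instance

-- ===== CLAIM (what is proved, stated in full; the proofs are below) =====
def Claim_equal_multiples : Prop := ∀ (num1 : Int) (num2 : Int) (maxNum : Int), Dom_multiples num1 num2 maxNum → Pre_multiples num1 num2 maxNum → Spec_multiples num1 num2 maxNum (multiples num1 num2 maxNum)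

-- ===== LEMMAS AND PROOFS =====

-- A as a filter of the range
lemma multiples_eq_filter (num1 num2 maxNum : Int) :
    multiples num1 num2 maxNum =
      (PySem.List.pyRange 2 maxNum 1).filter
        (fun i => decide (PySem.Int.mod i num1 = 0) || decide (PySem.Int.mod i num2 = 0)) := by
  unfold multiples
  rw [show (fun (nums : List Int) (i : Int) =>
        if PySem.Int.mod i num1 = 0 then nums ++ [i]
        else if PySem.Int.mod i num2 = 0 then nums ++ [i]
        else nums)
      = (fun nums i => if (decide (PySem.Int.mod i num1 = 0) || decide (PySem.Int.mod i num2 = 0)) = true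
          then nums ++ [i] else nums) by
    funext nums i; by_cases h1 : PySem.Int.mod i num1 = 0 <;>
      by_cases h2 : PySem.Int.mod i num2 = 0 <;> simp [h1, h2]]
  rw [PySem.List.foldl_append_if]
  simp

-- no multiple of d strictly between two consecutive multiples
lemma no_mult_between {d a i : Int} (hd : 0 < d) (ha : d ∣ a) (hi : d ∣ i)
    (h1 : a - d < i) (h2 : i < a) : False := by
  obtain ⟨k, hk⟩ := ha; obtain ⟨m, hm⟩ := hi
  subst hk hm
  have : m < k := lt_of_mul_lt_mul_left (by linarith [mul_comm d k, mul_comm d m]) (le_of_lt hd)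
  nlinarith

-- when both streams are exhausted the loop stops, whatever fuel is left
lemma mergeLoop_stop (d1 d2 maxNum : Int) (fuel : Nat) (a b : Int) (out : List Int)
    (ha : maxNum ≤ a) (hb : maxNum ≤ b) :
    mergeLoop d1 d2 maxNum fuel a b out = out := by
  cases fuel with
  | zero => rfl
  | succ f => rw [mergeLoop, if_neg (by omega)]

-- the merge loop produces exactly the divisible elements of [lo, maxNum)
lemma mergeLoop_spec (d1 d2 maxNum : Int) (hd1 : 0 < d1) (hd2 : 0 < d2) :
    ∀ (k : Nat) (lo a b : Int) (fuel : Nat) (out : List Int),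
      (maxNum - lo).toNat ≤ k →
      (maxNum - a).toNat + (maxNum - b).toNat ≤ fuel →
      lo ≤ a → lo ≤ b → d1 ∣ a → d2 ∣ b →
      (∀ i, lo ≤ i → i < a → ¬ d1 ∣ i) →
      (∀ i, lo ≤ i → i < b → ¬ d2 ∣ i) →
      mergeLoop d1 d2 maxNum fuel a b out =
        out ++ (PySem.List.pyRange lo maxNum 1).filter
          (fun i => decide (d1 ∣ i) || decide (d2 ∣ i)) := by
  intro k
  induction k with
  | zero =>
    intro lo a b fuel out hk hf hla hlb hda hdb hna hnb
    rw [PySem.List.pyRange_one_eq_nil (by omega), mergeLoop_stop d1 d2 maxNum fuel a b out (by omega) (by omega)]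
    simp
  | succ k ih =>
    intro lo a b fuel out hk hf hla hlb hda hdb hna hnb
    by_cases hlo : maxNum ≤ lo
    · rw [PySem.List.pyRange_one_eq_nil hlo, mergeLoop_stop d1 d2 maxNum fuel a b out (by omega) (by omega)]
      simp
    · rw [Int.not_le] at hlo
      rw [PySem.List.pyRange_one_cons hlo]
      by_cases hea : lo = a
      · -- the loop takes a step, so it has positive fuel
        obtain ⟨f, rfl⟩ : ∃ f, fuel = f + 1 := ⟨fuel - 1, by omega⟩
        by_cases heb : lo = b
        · -- a = b = lo: take both
          subst hea; subst heb
          rw [mergeLoop, if_pos (by omega), if_neg (by omega), if_neg (by omega)]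
          rw [ih (lo + 1) (lo + d1) (lo + d2) f (out ++ [lo]) (by omega) (by omega) (by omega) (by omega)
              (by exact dvd_add hda ⟨1, by ring⟩) (by exact dvd_add hdb ⟨1, by ring⟩)
              (fun i h1 h2 hdvd => no_mult_between hd1 (dvd_add hda ⟨1, by ring⟩) hdvd (by omega) h2)
              (fun i h1 h2 hdvd => no_mult_between hd2 (dvd_add hdb ⟨1, by ring⟩) hdvd (by omega) h2)]
          simp [hda]
        · -- a = lo < b: take a
          subst hea
          rw [mergeLoop, if_pos (by omega), if_pos (by omega)]
          rw [ih (lo + 1) (lo + d1) b f (out ++ [lo]) (by omega) (by omega) (by omega) (by omega)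
              (by exact dvd_add hda ⟨1, by ring⟩) hdb
              (fun i h1 h2 hdvd => no_mult_between hd1 (dvd_add hda ⟨1, by ring⟩) hdvd (by omega) h2)
              (fun i h1 h2 hdvd => hnb i (by omega) h2 hdvd)]
          simp [hda]
      · by_cases heb : lo = b
        · -- b = lo < a: take b
          obtain ⟨f, rfl⟩ : ∃ f, fuel = f + 1 := ⟨fuel - 1, by omega⟩
          subst heb
          rw [mergeLoop, if_pos (by omega), if_neg (by omega), if_pos (by omega)]
          rw [ih (lo + 1) a (lo + d2) f (out ++ [lo]) (by omega) (by omega) (by omega) (by omega)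
              hda (by exact dvd_add hdb ⟨1, by ring⟩)
              (fun i h1 h2 hdvd => hna i (by omega) h2 hdvd)
              (fun i h1 h2 hdvd => no_mult_between hd2 (dvd_add hdb ⟨1, by ring⟩) hdvd (by omega) h2)]
          have : ¬ d1 ∣ lo := hna lo le_rfl (by omega)
          simp [hdb, this]
        · -- lo < a and lo < b: lo is divisible by neither, skip it in the filter
          have h1 : ¬ d1 ∣ lo := hna lo le_rfl (by omega)
          have h2 : ¬ d2 ∣ lo := hnb lo le_rfl (by omega)
          rw [ih (lo + 1) a b fuel out (by omega) hf (by omega) (by omega) hda hdb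
              (fun i hi1 hi2 => hna i (by omega) hi2)
              (fun i hi1 hi2 => hnb i (by omega) hi2)]
          simp [h1, h2]

-- the starting point -((-2) // d) * d is the least multiple of d that is ≥ 2
lemma start_spec {d : Int} (hd : 0 < d) :
    let a := -(PySem.Int.floordiv (-2) d) * d
    d ∣ a ∧ 2 ≤ a ∧ a < 2 + d := by
  intro a
  have hq : -(PySem.Int.floordiv (-2) d) = -PySem.Int.floordiv (-2) d := rfl
  have key : (-(PySem.Int.floordiv (-2) d) - 1) * d < 2 ∧ 2 ≤ -(PySem.Int.floordiv (-2) d) * d := by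
    have := (PySem.Int.neg_floordiv_neg_eq_iff_of_pos (a := 2) (b := d)
      (q := -(PySem.Int.floordiv (-2) d)) hd).mp rfl
    exact this
  refine ⟨⟨-(PySem.Int.floordiv (-2) d), by ring⟩, key.2, ?_⟩
  nlinarith [key.1]

lemma mod_or_iff (num : Int) (i : Int) :
    (PySem.Int.mod i num = 0) ↔ (|num| ∣ i) := by
  rw [PySem.Int.mod_eq_zero_iff_dvd, abs_dvd]

-- ===== VERDICT (by name: the statement is the Claim_ definition above) =====
theorem multiples_spec : Claim_equal_multiples := by
  intro num1 num2 maxNum _hDom hPre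
  obtain ⟨h1, h2⟩ := hPre
  unfold Spec_multiples multiples_alt
  have hd1 : (0:Int) < |num1| := abs_pos.mpr h1
  have hd2 : (0:Int) < |num2| := abs_pos.mpr h2
  obtain ⟨hda, h2a, haub⟩ := start_spec hd1
  obtain ⟨hdb, h2b, hbub⟩ := start_spec hd2
  rw [mergeLoop_spec |num1| |num2| maxNum hd1 hd2 (maxNum - 2).toNat 2 _ _ _ [] le_rfl le_rfl h2a h2b hda hdb
      (fun i hi1 hi2 hdvd => no_mult_between hd1 hda hdvd (by omega) hi2)
      (fun i hi1 hi2 hdvd => no_mult_between hd2 hdb hdvd (by omega) hi2)]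
  rw [multiples_eq_filter]
  simp only [List.nil_append]
  apply List.filter_congr
  intro i _
  rw [show (decide (PySem.Int.mod i num1 = 0) || decide (PySem.Int.mod i num2 = 0))
      = (decide (|num1| ∣ i) || decide (|num2| ∣ i)) by
    simp [mod_or_iff num1, mod_or_iff num2]]
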